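-- pv_equiv track=rewrite | github.com/Leooon726/AIEnglishLearning | core/draw_text.py | get_words_and_punctuations
-- ===== SOURCE A (Python) =====
-- def get_words_and_punctuations(line):
--     words_and_punctuations = []
--     current_word = ""
--
--     for char in line:
--         if char.isalnum():  # Check if the character is part of a word
--             current_word += char
--         else:
--             if current_word:  # If we have a current word, add it to the list
--                 words_and_punctuations.append(current_word)
--                 current_word = ""
--             if char.strip():  # If the character is not a whitespace, add it as punctuation
--                 words_and_punctuations.append(char)
--
--     if current_word:  # Add the last word if there is one
--         words_and_punctuations.append(current_word)
--
--     return words_and_punctuations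
-- ===== SOURCE B (Python) =====
-- def get_words_and_punctuations(line):
--     out = []
--     i, n = 0, len(line)
--     while i < n:
--         if line[i].isalnum():
--             j = i
--             while j < n and line[j].isalnum():
--                 j += 1
--             out.append(line[i:j])
--             i = j
--         else:
--             ch = line[i]
--             if ch.strip():
--                 out.append(ch)
--             i += 1
--     return out
-- ===== Notes on version B (the rewrite author's own statement) =====
-- stated objective: alternative
-- what changed: Replaces the stateful accumulate/flush character loop with an index scan that extracts each maximal alphanumeric run as a whole slice and emits non-whitespace separators one by one, so no current-word accumulator or trailing flush exists.
import Mathlib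
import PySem

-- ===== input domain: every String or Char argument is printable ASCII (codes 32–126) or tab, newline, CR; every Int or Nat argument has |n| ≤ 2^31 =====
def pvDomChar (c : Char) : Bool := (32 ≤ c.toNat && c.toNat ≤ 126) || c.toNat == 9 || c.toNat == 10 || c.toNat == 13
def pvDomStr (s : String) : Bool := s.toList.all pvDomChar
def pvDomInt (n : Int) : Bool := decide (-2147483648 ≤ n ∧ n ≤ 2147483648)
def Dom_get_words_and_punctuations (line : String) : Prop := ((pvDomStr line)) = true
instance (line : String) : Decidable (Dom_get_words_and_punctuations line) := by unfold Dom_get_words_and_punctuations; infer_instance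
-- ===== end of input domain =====

-- B replaces A's accumulate/flush loop by extracting maximal alphanumeric runs as slices; same values, alternative structure.

-- ===== PORT A =====
-- one loop step of A: state = (result list so far, characters of current_word)
def pvAStep (st : List String × List Char) (c : Char) : List String × List Char :=
  if PySem.Chars.isalnum c then
    (st.1, st.2 ++ [c])
  else
    let st1 := if st.2.isEmpty then st else (st.1 ++ [String.ofList st.2], ([] : List Char))
    if (PySem.Chars.strip [c]).isEmpty then st1 else (st1.1 ++ [String.ofList [c]], st1.2)

def get_words_and_punctuations (line : String) : List String :=
  let st := line.toList.foldl pvAStep ([], [])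
  if st.2.isEmpty then st.1 else st.1 ++ [String.ofList st.2]

-- ===== PORT B =====
-- B's scan: at an alnum char take the whole maximal alnum run (line[i:j]) and continue after it;
-- at any other char emit it iff it is not whitespace (char.strip() nonempty).
def pvBGo : List Char → List String
  | [] => []
  | c :: rest =>
    if PySem.Chars.isalnum c then
      String.ofList (c :: rest.takeWhile PySem.Chars.isalnum)
        :: pvBGo (rest.dropWhile PySem.Chars.isalnum)
    else
      (if (PySem.Chars.strip [c]).isEmpty then [] else [String.ofList [c]]) ++ pvBGo rest
termination_by cs => cs.length
decreasing_by
  · exact Nat.lt_succ_of_le (List.length_dropWhile_le _ _)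
  · simp

def get_words_and_punctuations_alt (line : String) : List String :=
  pvBGo line.toList

-- ===== PRECONDITION & SPEC =====
def Spec_get_words_and_punctuations (line : String) (out : List String) : Prop := out = get_words_and_punctuations_alt line
instance (line : String) (out : List String) : Decidable (Spec_get_words_and_punctuations line out) := by unfold Spec_get_words_and_punctuations; infer_instance

-- ===== CLAIM (what is proved, stated in full; the proofs are below) =====
def Claim_equal_get_words_and_punctuations : Prop := ∀ (line : String), Dom_get_words_and_punctuations line → Spec_get_words_and_punctuations line (get_words_and_punctuations line)

-- ===== LEMMAS AND PROOFS =====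

-- Key invariant: finalizing A's fold from state (acc, cur) yields acc followed by the word
-- cur merged with the leading alnum run, then B's tokenization of the remainder.
theorem pvA_fold_eq (cs : List Char) : ∀ (acc : List String) (cur : List Char),
    (let st := cs.foldl pvAStep (acc, cur);
     if st.2.isEmpty then st.1 else st.1 ++ [String.ofList st.2])
    = acc ++ (if cur.isEmpty then pvBGo cs
              else String.ofList (cur ++ cs.takeWhile PySem.Chars.isalnum)
                     :: pvBGo (cs.dropWhile PySem.Chars.isalnum)) := by
  induction cs with
  | nil =>
    intro acc cur
    cases cur <;> simp [pvBGo]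
  | cons c cs ih =>
    intro acc cur
    by_cases hal : PySem.Chars.isalnum c = true
    · have h1 : pvAStep (acc, cur) c = (acc, cur ++ [c]) := by
        simp [pvAStep, hal]
      simp only [List.foldl_cons, h1, ih]
      cases cur with
      | nil => simp [pvBGo, hal]
      | cons d ds => simp [hal]
    · have hstep : pvAStep (acc, cur) c =
        ((if cur.isEmpty then acc else acc ++ [String.ofList cur]) ++
          (if (PySem.Chars.strip [c]).isEmpty then [] else [String.ofList [c]]), ([] : List Char)) := by
        cases cur <;> simp [pvAStep, hal] <;> split <;> simp
      simp only [List.foldl_cons, hstep, ih]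
      cases cur with
      | nil => simp [pvBGo, hal]
      | cons d ds => simp [pvBGo, hal]

-- ===== VERDICT (by name: the statement is the Claim_ definition above) =====
theorem get_words_and_punctuations_spec : Claim_equal_get_words_and_punctuations := by
  intro line _
  show _ = _
  simpa [get_words_and_punctuations, get_words_and_punctuations_alt] using
    pvA_fold_eq line.toList [] []
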